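-- pv_equiv track=rewrite | github.com/alivk/GenAI-AWS-Diagram-Animator | bedrock_utils.py | parse_diagram_spec
-- ===== SOURCE A (Python) =====
-- def parse_diagram_spec(text):
--     """Parse the diagram specification from the prompt text"""
--     nodes = []
--     connections = []
--     animations = []
--
--     current_section = None
--     for line in text.split('\n'):
--         line = line.strip()
--         if not line:
--             continue
--
--         if line.startswith('['):
--             current_section = line[1:-1].lower()
--             continue
--
--         if current_section == 'diagram nodes':
--             if ' - ' in line:
--                 node_type, node_name = line.split(' - ', 1)
--                 nodes.append((node_type.strip(), node_name.strip()))
--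
--         elif current_section == 'diagram connection':
--             connectors = [
--                 '~~', '~>', '==', '=>', '--', '->', 'to>', ' to>', ' to ', '>>'
--             ]
--             for c in connectors:
--                 if c in line:
--                     connector = c
--                     source, target = line.split(c, 1)
--                     connections.append((source.strip(), target.strip(), connector))
--                     break
--
--         elif current_section == 'animation':
--             # Handle all connection types in animations
--             connectors = ['~~', '~>', '==', '=>', '--', '->', ' to> ', ' to ', '>>']
--             for c in connectors:
--                 if c in line:
--                     source, target = line.split(c, 1)
--                     animations.append((source.strip(), target.strip()))
--                     break
--
--     return nodes, connections, animations
-- ===== SOURCE B (Python) =====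
-- # Two-pass re-implementation: group lines by section occurrence, then dispatch each
-- # group to a dedicated per-section handler.
--
-- _CONN_CONNECTORS = ['~~', '~>', '==', '=>', '--', '->', 'to>', ' to>', ' to ', '>>']
-- _ANIM_CONNECTORS = ['~~', '~>', '==', '=>', '--', '->', ' to> ', ' to ', '>>']
--
--
-- def _split2(line, c):
--     a, b = line.split(c, 1)
--     return a.strip(), b.strip()
--
--
-- def _node_parse(line):
--     if ' - ' in line:
--         return _split2(line, ' - ')
--     return None
--
--
-- def _conn_parse(line):
--     c = next((c for c in _CONN_CONNECTORS if c in line), None)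
--     if c is None:
--         return None
--     s, t = _split2(line, c)
--     return (s, t, c)
--
--
-- def _anim_parse(line):
--     c = next((c for c in _ANIM_CONNECTORS if c in line), None)
--     if c is None:
--         return None
--     return _split2(line, c)
--
--
-- def _group_sections(text):
--     """Ordered list of (section-or-None, body lines), one entry per section occurrence."""
--     groups = []
--     current = (None, [])
--     for raw in text.split('\n'):
--         line = raw.strip()
--         if not line:
--             continue
--         if line.startswith('['):
--             groups.append(current)
--             current = (line[1:-1].lower(), [])
--         else:
--             current[1].append(line)
--     groups.append(current)
--     return groups
--
--
-- def parse_diagram_spec(text):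
--     nodes = []
--     connections = []
--     animations = []
--     for section, lines in _group_sections(text):
--         if section == 'diagram nodes':
--             nodes += [p for p in map(_node_parse, lines) if p is not None]
--         elif section == 'diagram connection':
--             connections += [p for p in map(_conn_parse, lines) if p is not None]
--         elif section == 'animation':
--             animations += [p for p in map(_anim_parse, lines) if p is not None]
--     return nodes, connections, animations
-- ===== Notes on version B (the rewrite author's own statement) =====
-- stated objective: alternative
-- what changed: Replaces A's single stateful loop with a two-pass decomposition: first group lines per section occurrence, then dispatch each group to a dedicated handler (nodes/connections/animations) built from per-line Optional parsers.
import Mathlib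
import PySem

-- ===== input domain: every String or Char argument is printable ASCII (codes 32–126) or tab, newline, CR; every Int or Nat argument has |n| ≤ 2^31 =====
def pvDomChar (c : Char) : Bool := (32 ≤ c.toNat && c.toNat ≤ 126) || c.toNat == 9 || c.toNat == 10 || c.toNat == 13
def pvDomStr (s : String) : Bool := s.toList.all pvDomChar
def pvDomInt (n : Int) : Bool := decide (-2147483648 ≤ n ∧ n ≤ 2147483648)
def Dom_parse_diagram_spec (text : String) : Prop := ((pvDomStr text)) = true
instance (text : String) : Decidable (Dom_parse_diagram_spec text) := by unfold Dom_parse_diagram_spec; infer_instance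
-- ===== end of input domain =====

-- B re-decomposes A's single stateful loop into a group-by-section pass plus per-section handlers; objective: alternative decomposition (same cost).

abbrev PVTriple := (List (String × String)) × (List (String × String × String)) × (List (String × String))

-- ===== PORT A =====
def pvA_connectors : List String := ["~~", "~>", "==", "=>", "--", "->", "to>", " to>", " to ", ">>"]
def pvA_animConnectors : List String := ["~~", "~>", "==", "=>", "--", "->", " to> ", " to ", ">>"]

-- the 'for c in connectors: if c in line: …; break' loop
def pvA_firstConn : List String → String → Option String
  | [], _ => none
  | c :: rest, line => if PySem.Str.isIn c line then some c else pvA_firstConn rest line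

-- line.split(c, 1) unpacked into two parts (always two when c in line)
def pvA_split1 (line c : String) : String × String :=
  match PySem.Str.splitMax? line c 1 with
  | some (a :: b :: _) => (a, b)
  | _ => ("", "")

def pvA_step (st : Option String × PVTriple) (raw : String) : Option String × PVTriple :=
  let line := PySem.Str.strip raw
  if line = "" then st
  else if PySem.Str.startswith line "[" then
    (some (PySem.Str.lower (PySem.Str.slice line (some 1) (some (-1)))), st.2)
  else
    match st.1 with
    | some sec =>
      if sec = "diagram nodes" then
        if PySem.Str.isIn " - " line then
          let p := pvA_split1 line " - "
          (st.1, (st.2.1 ++ [(PySem.Str.strip p.1, PySem.Str.strip p.2)], st.2.2.1, st.2.2.2))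
        else st
      else if sec = "diagram connection" then
        match pvA_firstConn pvA_connectors line with
        | some c =>
          let p := pvA_split1 line c
          (st.1, (st.2.1, st.2.2.1 ++ [(PySem.Str.strip p.1, PySem.Str.strip p.2, c)], st.2.2.2))
        | none => st
      else if sec = "animation" then
        match pvA_firstConn pvA_animConnectors line with
        | some c =>
          let p := pvA_split1 line c
          (st.1, (st.2.1, st.2.2.1, st.2.2.2 ++ [(PySem.Str.strip p.1, PySem.Str.strip p.2)]))
        | none => st
      else st
    | none => st

def parse_diagram_spec (text : String) : PVTriple :=
  (((PySem.Str.split? text "\n").getD []).foldl pvA_step (none, ([], [], []))).2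

-- ===== PORT B =====
def pvB_connConnectors : List String := ["~~", "~>", "==", "=>", "--", "->", "to>", " to>", " to ", ">>"]
def pvB_animConnectors : List String := ["~~", "~>", "==", "=>", "--", "->", " to> ", " to ", ">>"]

def pvB_split2 (line c : String) : String × String :=
  match PySem.Str.splitMax? line c 1 with
  | some (a :: b :: _) => (PySem.Str.strip a, PySem.Str.strip b)
  | _ => ("", "")

def pvB_node? (line : String) : Option (String × String) :=
  if PySem.Str.isIn " - " line then some (pvB_split2 line " - ") else none

def pvB_conn? (line : String) : Option (String × String × String) :=
  match pvB_connConnectors.find? (fun c => PySem.Str.isIn c line) with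
  | some c => some ((pvB_split2 line c).1, (pvB_split2 line c).2, c)
  | none => none

def pvB_anim? (line : String) : Option (String × String) :=
  match pvB_animConnectors.find? (fun c => PySem.Str.isIn c line) with
  | some c => some (pvB_split2 line c)
  | none => none

def pvB_groupStep (st : List (Option String × List String) × (Option String × List String))
    (raw : String) : List (Option String × List String) × (Option String × List String) :=
  let line := PySem.Str.strip raw
  if line = "" then st
  else if PySem.Str.startswith line "[" then
    (st.1 ++ [st.2], (some (PySem.Str.lower (PySem.Str.slice line (some 1) (some (-1)))), []))
  else (st.1, (st.2.1, st.2.2 ++ [line]))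

def pvB_groups (text : String) : List (Option String × List String) :=
  let st := ((PySem.Str.split? text "\n").getD []).foldl pvB_groupStep ([], (none, []))
  st.1 ++ [st.2]

def pvB_dispatch (g : Option String × List String) : PVTriple :=
  match g.1 with
  | some s =>
    if s = "diagram nodes" then (g.2.filterMap pvB_node?, [], [])
    else if s = "diagram connection" then ([], g.2.filterMap pvB_conn?, [])
    else if s = "animation" then ([], [], g.2.filterMap pvB_anim?)
    else ([], [], [])
  | none => ([], [], [])

def pvB_appT (a b : PVTriple) : PVTriple := (a.1 ++ b.1, a.2.1 ++ b.2.1, a.2.2 ++ b.2.2)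

def parse_diagram_spec_alt (text : String) : PVTriple :=
  (pvB_groups text).foldl (fun t g => pvB_appT t (pvB_dispatch g)) ([], [], [])

-- ===== PRECONDITION & SPEC =====
def Spec_parse_diagram_spec (text : String) (out : PVTriple) : Prop := out = parse_diagram_spec_alt text
instance (text : String) (out : PVTriple) : Decidable (Spec_parse_diagram_spec text out) := by unfold Spec_parse_diagram_spec; infer_instance

-- ===== CLAIM (what is proved, stated in full; the proofs are below) =====
def Claim_equal_parse_diagram_spec : Prop := ∀ (text : String), Dom_parse_diagram_spec text → Spec_parse_diagram_spec text (parse_diagram_spec text)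

-- ===== LEMMAS AND PROOFS =====

theorem pv_appT_nil_right (t : PVTriple) : pvB_appT t ([], [], []) = t := by
  simp [pvB_appT]

theorem pv_appT_nil_left (t : PVTriple) : pvB_appT ([], [], []) t = t := by
  simp [pvB_appT]

theorem pv_appT_assoc (a b c : PVTriple) :
    pvB_appT (pvB_appT a b) c = pvB_appT a (pvB_appT b c) := by
  simp [pvB_appT]

def pvPG (gs : List (Option String × List String)) : PVTriple :=
  gs.foldl (fun t g => pvB_appT t (pvB_dispatch g)) ([], [], [])

theorem pv_foldl_appT (gs : List (Option String × List String)) (t : PVTriple) :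
    gs.foldl (fun t g => pvB_appT t (pvB_dispatch g)) t = pvB_appT t (pvPG gs) := by
  induction gs generalizing t with
  | nil => simp [pvPG, pv_appT_nil_right]
  | cons g rest ih =>
    rw [List.foldl_cons, ih]
    have h2 : pvPG (g :: rest) = pvB_appT (pvB_dispatch g) (pvPG rest) := by
      show List.foldl _ (pvB_appT ([], [], []) (pvB_dispatch g)) rest = _
      rw [ih, pv_appT_nil_left]
    rw [h2, pv_appT_assoc]

theorem pv_pg_append (xs ys : List (Option String × List String)) :
    pvPG (xs ++ ys) = pvB_appT (pvPG xs) (pvPG ys) := by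
  show List.foldl _ _ (xs ++ ys) = _
  rw [List.foldl_append, pv_foldl_appT]
  rfl

theorem pv_pg_single (g : Option String × List String) : pvPG [g] = pvB_dispatch g := by
  show pvB_appT ([], [], []) (pvB_dispatch g) = _
  exact pv_appT_nil_left _

theorem pv_dispatch_nil (sec : Option String) : pvB_dispatch (sec, []) = ([], [], []) := by
  cases sec with
  | none => rfl
  | some s => simp only [pvB_dispatch]; split_ifs <;> rfl

theorem pv_dispatch_append (sec : Option String) (xs ys : List String) :
    pvB_dispatch (sec, xs ++ ys) = pvB_appT (pvB_dispatch (sec, xs)) (pvB_dispatch (sec, ys)) := by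
  cases sec with
  | none => simp [pvB_dispatch, pvB_appT]
  | some s =>
    simp only [pvB_dispatch]
    split_ifs <;> simp [pvB_appT, List.filterMap_append]

-- shapes of one group step
theorem pv_gs_blank (st : List (Option String × List String) × (Option String × List String))
    (raw : String) (h1 : PySem.Str.strip raw = "") : pvB_groupStep st raw = st := by
  simp [pvB_groupStep, h1]

theorem pv_gs_header (g0 : List (Option String × List String)) (cur : Option String × List String)
    (raw : String) (h1 : ¬ PySem.Str.strip raw = "")
    (h2 : PySem.Str.startswith (PySem.Str.strip raw) "[" = true) :
    pvB_groupStep (g0, cur) raw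
      = (g0 ++ [cur], (some (PySem.Str.lower (PySem.Str.slice (PySem.Str.strip raw) (some 1) (some (-1)))), [])) := by
  simp only [pvB_groupStep]
  rw [if_neg h1, if_pos h2]

theorem pv_gs_content (g0 : List (Option String × List String)) (s : Option String)
    (ls : List String) (raw : String) (h1 : ¬ PySem.Str.strip raw = "")
    (h2 : ¬ PySem.Str.startswith (PySem.Str.strip raw) "[" = true) :
    pvB_groupStep (g0, (s, ls)) raw = (g0, (s, ls ++ [PySem.Str.strip raw])) := by
  simp only [pvB_groupStep]
  rw [if_neg h1, if_neg h2]

-- the group-and-dispatch result starting from section sec with pending body lines pend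
def pvG (sec : Option String) (pend : List String) (ls : List String) : PVTriple :=
  let st := ls.foldl pvB_groupStep ([], (sec, pend))
  pvPG (st.1 ++ [st.2])

theorem pv_groups_shift (ls : List String) (g0 : List (Option String × List String))
    (c0 : Option String × List String) :
    ls.foldl pvB_groupStep (g0, c0)
      = (g0 ++ (ls.foldl pvB_groupStep ([], c0)).1, (ls.foldl pvB_groupStep ([], c0)).2) := by
  induction ls generalizing g0 c0 with
  | nil => simp
  | cons l rest ih =>
    simp only [List.foldl_cons]
    have hstep : pvB_groupStep (g0, c0) l
        = (g0 ++ (pvB_groupStep ([], c0) l).1, (pvB_groupStep ([], c0) l).2) := by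
      simp only [pvB_groupStep]
      split_ifs <;> simp
    rw [hstep]
    rcases h : pvB_groupStep ([], c0) l with ⟨g1, c1⟩
    rw [ih, ih g1 c1]
    simp

theorem pv_G_cons_blank (sec : Option String) (pend : List String) (l : String) (rest : List String)
    (h1 : PySem.Str.strip l = "") : pvG sec pend (l :: rest) = pvG sec pend rest := by
  simp only [pvG, List.foldl_cons]
  rw [pv_gs_blank _ l h1]

theorem pv_G_cons_header (sec : Option String) (pend : List String) (l : String) (rest : List String)
    (h1 : ¬ PySem.Str.strip l = "") (h2 : PySem.Str.startswith (PySem.Str.strip l) "[" = true) :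
    pvG sec pend (l :: rest)
      = pvB_appT (pvB_dispatch (sec, pend))
          (pvG (some (PySem.Str.lower (PySem.Str.slice (PySem.Str.strip l) (some 1) (some (-1))))) [] rest) := by
  simp only [pvG, List.foldl_cons]
  rw [pv_gs_header [] (sec, pend) l h1 h2]
  simp only [List.nil_append]
  rw [pv_groups_shift rest [(sec, pend)]]
  rw [List.append_assoc, pv_pg_append, pv_pg_single]

theorem pv_G_cons_content (sec : Option String) (pend : List String) (l : String) (rest : List String)
    (h1 : ¬ PySem.Str.strip l = "") (h2 : ¬ PySem.Str.startswith (PySem.Str.strip l) "[" = true) :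
    pvG sec pend (l :: rest) = pvG sec (pend ++ [PySem.Str.strip l]) rest := by
  simp only [pvG, List.foldl_cons]
  rw [pv_gs_content [] sec pend l h1 h2]

theorem pv_G_pend (ls : List String) (sec : Option String) (pend : List String) :
    pvG sec pend ls = pvB_appT (pvB_dispatch (sec, pend)) (pvG sec [] ls) := by
  induction ls generalizing sec pend with
  | nil =>
    simp only [pvG, List.foldl_nil, List.nil_append]
    rw [pv_pg_single, pv_pg_single, pv_dispatch_nil, pv_appT_nil_right]
  | cons l rest ih =>
    by_cases h1 : PySem.Str.strip l = ""
    · rw [pv_G_cons_blank sec pend l rest h1, pv_G_cons_blank sec [] l rest h1]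
      exact ih sec pend
    · by_cases h2 : PySem.Str.startswith (PySem.Str.strip l) "["
      · rw [pv_G_cons_header sec pend l rest h1 h2, pv_G_cons_header sec [] l rest h1 h2,
            pv_dispatch_nil, pv_appT_nil_left]
      · rw [pv_G_cons_content sec pend l rest h1 h2, pv_G_cons_content sec [] l rest h1 h2]
        simp only [List.nil_append]
        rw [ih sec (pend ++ [PySem.Str.strip l]), ih sec [PySem.Str.strip l],
            pv_dispatch_append sec pend [PySem.Str.strip l], pv_appT_assoc]

theorem pv_firstConn_eq_find? (cs : List String) (line : String) :
    pvA_firstConn cs line = cs.find? (fun c => PySem.Str.isIn c line) := by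
  induction cs with
  | nil => rfl
  | cons c rest ih =>
    rw [List.find?_cons]
    cases h : PySem.Str.isIn c line
    · show (if PySem.Str.isIn c line = true then some c else pvA_firstConn rest line) = _
      rw [h, ih]
      simp
    · show (if PySem.Str.isIn c line = true then some c else pvA_firstConn rest line) = _
      rw [h]
      simp

theorem pv_split2_eq (line c : String) :
    pvB_split2 line c = (PySem.Str.strip (pvA_split1 line c).1, PySem.Str.strip (pvA_split1 line c).2) := by
  rcases h : PySem.Str.splitMax? line c 1 with _ | ⟨_ | ⟨a, _ | ⟨b, rest⟩⟩⟩ <;>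
    simp only [pvB_split2, pvA_split1, h] <;> rfl

-- shapes of one A step
theorem pv_step_blank (st : Option String × PVTriple) (raw : String)
    (h1 : PySem.Str.strip raw = "") : pvA_step st raw = st := by
  simp [pvA_step, h1]

theorem pv_step_header (sec : Option String) (T : PVTriple) (raw : String)
    (h1 : ¬ PySem.Str.strip raw = "")
    (h2 : PySem.Str.startswith (PySem.Str.strip raw) "[" = true) :
    pvA_step (sec, T) raw
      = (some (PySem.Str.lower (PySem.Str.slice (PySem.Str.strip raw) (some 1) (some (-1)))), T) := by
  simp only [pvA_step]
  rw [if_neg h1, if_pos h2]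

-- A's per-line effect on a content line equals B's one-line dispatch
set_option maxHeartbeats 2000000 in
theorem pv_step_content (sec : Option String) (T : PVTriple) (raw : String)
    (h1 : ¬ PySem.Str.strip raw = "") (h2 : ¬ PySem.Str.startswith (PySem.Str.strip raw) "[" = true) :
    pvA_step (sec, T) raw = (sec, pvB_appT T (pvB_dispatch (sec, [PySem.Str.strip raw]))) := by
  cases sec with
  | none =>
    simp only [pvA_step]
    rw [if_neg h1, if_neg h2]
    simp [pvB_dispatch, pvB_appT]
  | some s =>
    simp only [pvA_step]
    rw [if_neg h1, if_neg h2]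
    simp only [pvB_dispatch]
    by_cases hn : s = "diagram nodes"
    · subst hn
      simp only [pvB_node?, List.filterMap_cons, List.filterMap_nil]
      by_cases hin : PySem.Str.isIn " - " (PySem.Str.strip raw)
      · simp only [if_pos hin]
        simp [pv_split2_eq, pvB_appT]
      · simp only [if_neg hin]
        simp [pvB_appT]
    · simp only [if_neg hn]
      by_cases hc : s = "diagram connection"
      · subst hc
        rw [pv_firstConn_eq_find?]
        simp only [pvA_connectors, pvB_conn?, List.filterMap_cons, List.filterMap_nil,
          pvB_connConnectors]
        rcases h : List.find? (fun c => PySem.Str.isIn c (PySem.Str.strip raw))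
            ["~~", "~>", "==", "=>", "--", "->", "to>", " to>", " to ", ">>"] with _ | c
        · simp [pvB_appT]
        · simp [pv_split2_eq, pvB_appT]
      · simp only [if_neg hc]
        by_cases ha : s = "animation"
        · subst ha
          rw [pv_firstConn_eq_find?]
          simp only [pvA_animConnectors, pvB_anim?, List.filterMap_cons, List.filterMap_nil,
            pvB_animConnectors]
          rcases h : List.find? (fun c => PySem.Str.isIn c (PySem.Str.strip raw))
              ["~~", "~>", "==", "=>", "--", "->", " to> ", " to ", ">>"] with _ | c
          · simp [pvB_appT]
          · simp [pv_split2_eq, pvB_appT]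
        · simp only [if_neg ha]
          simp [pvB_appT]

theorem pv_main (ls : List String) (sec : Option String) (T : PVTriple) :
    (ls.foldl pvA_step (sec, T)).2 = pvB_appT T (pvG sec [] ls) := by
  induction ls generalizing sec T with
  | nil =>
    simp only [List.foldl_nil, pvG, List.foldl_nil, List.nil_append]
    rw [pv_pg_single, pv_dispatch_nil, pv_appT_nil_right]
  | cons l rest ih =>
    by_cases h1 : PySem.Str.strip l = ""
    · rw [List.foldl_cons, pv_step_blank _ l h1, ih, pv_G_cons_blank sec [] l rest h1]
    · by_cases h2 : PySem.Str.startswith (PySem.Str.strip l) "["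
      · rw [List.foldl_cons, pv_step_header sec T l h1 h2, ih,
            pv_G_cons_header sec [] l rest h1 h2, pv_dispatch_nil, pv_appT_nil_left]
      · rw [List.foldl_cons, pv_step_content sec T l h1 h2, ih,
            pv_G_cons_content sec [] l rest h1 h2]
        simp only [List.nil_append]
        rw [pv_G_pend rest sec [PySem.Str.strip l], pv_appT_assoc]

-- ===== VERDICT (by name: the statement is the Claim_ definition above) =====
theorem parse_diagram_spec_spec : Claim_equal_parse_diagram_spec := by
  intro text _
  unfold Spec_parse_diagram_spec parse_diagram_spec parse_diagram_spec_alt pvB_groups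
  rw [pv_main, pv_appT_nil_left]
  rfl
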